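-- pv_equiv track=rewrite | github.com/2jimoo/P_C_C_P | done/0308_pccp_2_2.py | solution
-- ===== SOURCE A (Python) =====
-- import heapq
--
-- def solution(ability, number):
--     heapq.heapify(ability)
--     while number > 0:
--         a, b = heapq.heappop(ability), heapq.heappop(ability)
--         heapq.heappush(ability, a + b)
--         heapq.heappush(ability, a + b)
--         number -= 1
--     answer = sum(ability)
--     return answer
-- ===== SOURCE B (Python) =====
-- def _insort(xs, v):
--     i = 0
--     while i < len(xs) and xs[i] < v:
--         i += 1
--     xs.insert(i, v)
--
-- def solution(ability, number):
--     ability.sort()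
--     while number > 0:
--         a = ability.pop(0)
--         b = ability.pop(0)
--         s = a + b
--         _insort(ability, s)
--         _insort(ability, s)
--         number -= 1
--     return sum(ability)
-- ===== Notes on version B (the rewrite author's own statement) =====
-- stated objective: alternative
-- what changed: Replaces heapq's binary heap with a sorted list maintained by front-pops and ordered insertion; the sum of the merged multiset is identical.
import Mathlib
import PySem

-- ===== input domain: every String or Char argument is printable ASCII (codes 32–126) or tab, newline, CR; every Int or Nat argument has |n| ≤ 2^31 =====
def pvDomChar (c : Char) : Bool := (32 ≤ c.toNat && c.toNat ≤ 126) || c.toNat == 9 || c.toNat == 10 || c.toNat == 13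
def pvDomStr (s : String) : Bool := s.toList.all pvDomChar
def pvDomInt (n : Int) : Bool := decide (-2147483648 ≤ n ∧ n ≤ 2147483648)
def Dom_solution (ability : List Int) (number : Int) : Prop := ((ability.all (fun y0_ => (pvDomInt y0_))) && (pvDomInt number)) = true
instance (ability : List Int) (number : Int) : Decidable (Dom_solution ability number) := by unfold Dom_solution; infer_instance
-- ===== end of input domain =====

-- B replaces the heapq binary heap by a sorted list with front-pops and ordered insertion
-- (same return value; both versions mutate `ability` in place in Python — the equivalence
-- proved here is about the RETURN value only).

-- ===== PORT A =====
-- heapq's array heap is ported as a functional (skew) heap: heapify/heappop/heappush stay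
-- helpers; exact on the returned value (sum, and the popped minima of the same multiset).
inductive PHeap where
  | nil : PHeap
  | node : Int → PHeap → PHeap → PHeap
deriving DecidableEq, Repr

def PHeap.size : PHeap → Nat
  | .nil => 0
  | .node _ l r => PHeap.size l + PHeap.size r + 1

-- structural (fuel-based) skew-heap merge; the fuel size h₁ + size h₂ always suffices
def PHeap.mergeF : Nat → PHeap → PHeap → PHeap
  | 0, _, _ => .nil
  | _+1, .nil, h => h
  | _+1, h, .nil => h
  | f+1, .node x l r, .node y l' r' =>
      if x ≤ y then .node x (PHeap.mergeF f r (.node y l' r')) l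
      else .node y (PHeap.mergeF f r' (.node x l r)) l'

def PHeap.merge (h₁ h₂ : PHeap) : PHeap :=
  PHeap.mergeF (PHeap.size h₁ + PHeap.size h₂) h₁ h₂

def heappush (h : PHeap) (v : Int) : PHeap := PHeap.merge (.node v .nil .nil) h

-- heappop on the empty heap raises IndexError in Python: excluded by Pre_solution
def heappop : PHeap → Int × PHeap
  | .nil => (0, .nil)
  | .node x l r => (x, PHeap.merge l r)

def heapify (l : List Int) : PHeap := l.foldl heappush .nil

def heapSum : PHeap → Int
  | .nil => 0
  | .node x l r => x + heapSum l + heapSum r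

-- the `while number > 0` loop of A
def loopA : Nat → PHeap → PHeap
  | 0, h => h
  | n+1, h =>
      let p := heappop h        -- a, heap after first pop
      let q := heappop p.2      -- b, heap after second pop
      loopA n (heappush (heappush q.2 (p.1 + q.1)) (p.1 + q.1))

def solution (ability : List Int) (number : Int) : Int :=
  heapSum (loopA number.toNat (heapify ability))

-- ===== PORT B =====
-- _insort: insert before the first element ≥ v in a sorted list (= the Python while/insert)
def insortB (xs : List Int) (v : Int) : List Int := List.orderedInsert (· ≤ ·) v xs

-- the `while number > 0` loop of B; ability.pop(0) on a short list raises: excluded by Pre_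
def loopB : Nat → List Int → List Int
  | 0, s => s
  | n+1, s =>
      match s with
      | a :: b :: rest => loopB n (insortB (insortB rest (a + b)) (a + b))
      | s => s

def solution_alt (ability : List Int) (number : Int) : Int :=
  (loopB number.toNat (PySem.List.sorted ability (fun x => x) false)).sum

-- ===== PRECONDITION & SPEC =====
-- Pre_ excludes exactly the inputs on which A raises IndexError (heappop on a heap with
-- fewer than two elements while number > 0); B raises there too.
def Pre_solution (ability : List Int) (number : Int) : Prop :=
  number ≤ 0 ∨ 2 ≤ ability.length
instance (ability : List Int) (number : Int) : Decidable (Pre_solution ability number) := by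
  unfold Pre_solution; infer_instance
def pvWitness_solution : List Int × Int := ([1, 2, 3], 2)

def Spec_solution (ability : List Int) (number : Int) (out : Int) : Prop := out = solution_alt ability number
instance (ability : List Int) (number : Int) (out : Int) : Decidable (Spec_solution ability number out) := by unfold Spec_solution; infer_instance

-- ===== CLAIM (what is proved, stated in full; the proofs are below) =====
def Claim_equal_solution : Prop := ∀ (ability : List Int) (number : Int), Dom_solution ability number → Pre_solution ability number → Spec_solution ability number (solution ability number)

-- ===== LEMMAS AND PROOFS =====

def PHeap.toMul : PHeap → Multiset Int
  | .nil => 0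
  | .node x l r => x ::ₘ (PHeap.toMul l + PHeap.toMul r)

def PHeap.IsHeap : PHeap → Prop
  | .nil => True
  | .node x l r => (∀ y ∈ PHeap.toMul l, x ≤ y) ∧ (∀ y ∈ PHeap.toMul r, x ≤ y)
      ∧ PHeap.IsHeap l ∧ PHeap.IsHeap r

theorem toMul_mergeF (f : Nat) (h₁ h₂ : PHeap) (hf : PHeap.size h₁ + PHeap.size h₂ ≤ f) :
    PHeap.toMul (PHeap.mergeF f h₁ h₂) = PHeap.toMul h₁ + PHeap.toMul h₂ := by
  induction f generalizing h₁ h₂ with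
  | zero =>
      cases h₁ <;> cases h₂ <;> simp_all [PHeap.size, PHeap.mergeF, PHeap.toMul]
  | succ f ih =>
      cases h₁ with
      | nil => simp [PHeap.mergeF, PHeap.toMul]
      | node x l r =>
          cases h₂ with
          | nil => simp [PHeap.mergeF, PHeap.toMul]
          | node y l' r' =>
              simp only [PHeap.size] at hf
              by_cases hle : x ≤ y
              · have := ih r (.node y l' r') (by simp [PHeap.size]; omega)
                simp only [PHeap.mergeF, if_pos hle, PHeap.toMul, this,
                  ← Multiset.singleton_add]
                abel
              · have := ih r' (.node x l r) (by simp [PHeap.size]; omega)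
                simp only [PHeap.mergeF, if_neg hle, PHeap.toMul, this,
                  ← Multiset.singleton_add]
                abel

theorem toMul_merge (h₁ h₂ : PHeap) :
    PHeap.toMul (PHeap.merge h₁ h₂) = PHeap.toMul h₁ + PHeap.toMul h₂ :=
  toMul_mergeF _ h₁ h₂ le_rfl

theorem isHeap_mergeF (f : Nat) (h₁ h₂ : PHeap) (hf : PHeap.size h₁ + PHeap.size h₂ ≤ f)
    (H₁ : h₁.IsHeap) (H₂ : h₂.IsHeap) : (PHeap.mergeF f h₁ h₂).IsHeap := by
  induction f generalizing h₁ h₂ with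
  | zero => simp [PHeap.mergeF, PHeap.IsHeap]
  | succ f ih =>
      cases h₁ with
      | nil => simpa [PHeap.mergeF] using H₂
      | node x l r =>
          cases h₂ with
          | nil => simpa [PHeap.mergeF] using H₁
          | node y l' r' =>
              simp only [PHeap.size] at hf
              obtain ⟨hal, har, Hl, Hr⟩ := H₁
              obtain ⟨hal', har', Hl', Hr'⟩ := H₂
              by_cases hle : x ≤ y
              · have hrec := ih r (.node y l' r') (by simp [PHeap.size]; omega) Hr
                  ⟨hal', har', Hl', Hr'⟩
                have hbound : PHeap.size r + PHeap.size (.node y l' r') ≤ f := by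
                  simp [PHeap.size]; omega
                simp only [PHeap.mergeF, if_pos hle]
                refine ⟨?_, hal, hrec, Hl⟩
                intro z hz
                rw [toMul_mergeF f _ _ hbound] at hz
                rcases Multiset.mem_add.mp hz with hz | hz
                · exact har z hz
                · simp only [PHeap.toMul, Multiset.mem_cons, Multiset.mem_add] at hz
                  rcases hz with rfl | hz | hz
                  · exact hle
                  · exact le_trans hle (hal' z hz)
                  · exact le_trans hle (har' z hz)
              · have hyx : y ≤ x := le_of_lt (lt_of_not_ge hle)
                have hrec := ih r' (.node x l r) (by simp [PHeap.size]; omega) Hr'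
                  ⟨hal, har, Hl, Hr⟩
                have hbound : PHeap.size r' + PHeap.size (.node x l r) ≤ f := by
                  simp [PHeap.size]; omega
                simp only [PHeap.mergeF, if_neg hle]
                refine ⟨?_, hal', hrec, Hl'⟩
                intro z hz
                rw [toMul_mergeF f _ _ hbound] at hz
                rcases Multiset.mem_add.mp hz with hz | hz
                · exact har' z hz
                · simp only [PHeap.toMul, Multiset.mem_cons, Multiset.mem_add] at hz
                  rcases hz with rfl | hz | hz
                  · exact hyx
                  · exact le_trans hyx (hal z hz)
                  · exact le_trans hyx (har z hz)

theorem isHeap_merge (h₁ h₂ : PHeap) (H₁ : h₁.IsHeap) (H₂ : h₂.IsHeap) :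
    (PHeap.merge h₁ h₂).IsHeap := isHeap_mergeF _ h₁ h₂ le_rfl H₁ H₂

theorem toMul_heappush (h : PHeap) (v : Int) :
    PHeap.toMul (heappush h v) = v ::ₘ PHeap.toMul h := by
  simp [heappush, toMul_merge, PHeap.toMul]

theorem isHeap_heappush (h : PHeap) (v : Int) (H : h.IsHeap) : (heappush h v).IsHeap := by
  exact isHeap_merge _ _ (by simp [PHeap.IsHeap, PHeap.toMul]) H

theorem toMul_heapify (l : List Int) : PHeap.toMul (heapify l) = ↑l := by
  suffices H : ∀ (l : List Int) (h : PHeap),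
      PHeap.toMul (l.foldl heappush h) = PHeap.toMul h + ↑l by
    simpa [heapify, PHeap.toMul] using H l .nil
  intro l
  induction l with
  | nil => simp
  | cons x xs ih =>
      intro h
      simp only [List.foldl_cons, ih, toMul_heappush, ← Multiset.singleton_add,
        ← Multiset.cons_coe]
      abel

theorem isHeap_heapify (l : List Int) : (heapify l).IsHeap := by
  suffices H : ∀ (l : List Int) (h : PHeap), h.IsHeap → (l.foldl heappush h).IsHeap by
    exact H l .nil trivial
  intro l
  induction l with
  | nil => intro h H; simpa using H
  | cons x xs ih => intro h H; exact ih _ (isHeap_heappush _ _ H)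

theorem heapSum_eq (h : PHeap) : heapSum h = (PHeap.toMul h).sum := by
  induction h with
  | nil => simp [heapSum, PHeap.toMul]
  | node x l r ihl ihr => simp [heapSum, PHeap.toMul, ihl, ihr]; ring

-- root of a heap is a minimum
theorem root_min (x : Int) (l r : PHeap) (H : (PHeap.node x l r).IsHeap) :
    ∀ y ∈ PHeap.toMul (PHeap.node x l r), x ≤ y := by
  intro y hy
  simp only [PHeap.toMul, Multiset.mem_cons, Multiset.mem_add] at hy
  rcases hy with rfl | hy | hy
  · exact le_refl y
  · exact H.1 y hy
  · exact H.2.1 y hy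

-- the loop invariant relating A's heap and B's sorted list
def HInv (h : PHeap) (s : List Int) : Prop :=
  PHeap.toMul h = ↑s ∧ h.IsHeap ∧ s.Pairwise (· ≤ ·) ∧ 2 ≤ s.length

-- popping from a heap whose multiset is that of a sorted nonempty list yields its head
theorem pop_step (h : PHeap) (c : List Int) (hne : c ≠ [])
    (hm : PHeap.toMul h = ↑c) (hh : h.IsHeap) (hs : c.Pairwise (· ≤ ·)) :
    (heappop h).1 = c.head hne ∧
    PHeap.toMul (heappop h).2 = ↑(c.tail) ∧ (heappop h).2.IsHeap := by
  obtain ⟨a, t, rfl⟩ := List.exists_cons_of_ne_nil hne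
  cases h with
  | nil =>
      exfalso
      have : (a : Int) ∈ PHeap.toMul PHeap.nil := by rw [hm]; simp
      simp [PHeap.toMul] at this
  | node x l r =>
      have hx_mem : x ∈ (↑(a :: t) : Multiset Int) := by
        rw [← hm]; simp [PHeap.toMul]
      have ha_mem : (a : Int) ∈ PHeap.toMul (PHeap.node x l r) := by rw [hm]; simp
      have hax : a ≤ x := by
        have hx : x ∈ a :: t := Multiset.mem_coe.mp hx_mem
        rcases List.mem_cons.mp hx with rfl | hx
        · exact le_refl _
        · exact List.rel_of_pairwise_cons hs hx
      have hxa : x ≤ a := root_min x l r hh a ha_mem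
      have hxe : x = a := le_antisymm hxa hax
      subst hxe
      refine ⟨rfl, ?_, ?_⟩
      · have : PHeap.toMul (PHeap.merge l r) = (PHeap.toMul (PHeap.node x l r)).erase x := by
          simp [toMul_merge, PHeap.toMul]
        rw [heappop]
        simp only [this, hm]
        simp
      · exact isHeap_merge _ _ hh.2.2.1 hh.2.2.2

theorem sorted_insortB (s : List Int) (v : Int) (hs : s.Pairwise (· ≤ ·)) :
    (insortB s v).Pairwise (· ≤ ·) := List.Pairwise.orderedInsert (r := (· ≤ ·)) v s hs

theorem toMul_insortB (s : List Int) (v : Int) :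
    (↑(insortB s v) : Multiset Int) = v ::ₘ ↑s := by
  exact Quot.sound (List.perm_orderedInsert _ v s)

theorem length_insortB (s : List Int) (v : Int) :
    (insortB s v).length = s.length + 1 := List.orderedInsert_length _ s v

theorem loop_inv (n : Nat) (h : PHeap) (s : List Int) (H : HInv h s) :
    HInv (loopA n h) (loopB n s) := by
  induction n generalizing h s with
  | zero => simpa [loopA, loopB] using H
  | succ n ih =>
      obtain ⟨hm, hh, hs, hl⟩ := H
      obtain ⟨a, b, rest, rfl⟩ : ∃ a b rest, s = a :: b :: rest := by
        match s, hl with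
        | a :: b :: rest, _ => exact ⟨a, b, rest, rfl⟩
      have hne1 : (a :: b :: rest) ≠ [] := by simp
      obtain ⟨hp1, hm1, hh1⟩ := pop_step h _ hne1 hm hh hs
      have hs1 : (b :: rest).Pairwise (· ≤ ·) := (List.pairwise_cons.mp hs).2
      have hne2 : (b :: rest) ≠ [] := by simp
      obtain ⟨hp2, hm2, hh2⟩ := pop_step (heappop h).2 _ hne2 (by simpa using hm1) hh1 hs1
      have hA : loopA (n + 1) h =
          loopA n (heappush (heappush (heappop (heappop h).2).2
            ((heappop h).1 + (heappop (heappop h).2).1)) ((heappop h).1 + (heappop (heappop h).2).1)) := by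
        simp [loopA]
      have hab : (heappop h).1 + (heappop (heappop h).2).1 = a + b := by
        rw [hp1, hp2]; rfl
      rw [hA, hab]
      have hB : loopB (n + 1) (a :: b :: rest) =
          loopB n (insortB (insortB rest (a + b)) (a + b)) := by
        simp [loopB]
      rw [hB]
      apply ih
      refine ⟨?_, ?_, ?_, ?_⟩
      · rw [toMul_heappush, toMul_heappush, toMul_insortB, toMul_insortB, hm2]
        rfl
      · exact isHeap_heappush _ _ (isHeap_heappush _ _ hh2)
      · exact sorted_insortB _ _ (sorted_insortB _ _ ((List.pairwise_cons.mp (List.pairwise_cons.mp hs).2).2))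
      · simp only [length_insortB]
        omega

theorem sortedB_perm (l : List Int) :
    (↑(PySem.List.sorted l (fun x => x) false) : Multiset Int) = ↑l :=
  Quot.sound (PySem.List.sorted_perm l (fun x => x) false)

theorem sortedB_sorted (l : List Int) :
    (PySem.List.sorted l (fun x => x) false).Pairwise (· ≤ ·) := by
  exact PySem.List.sorted_pairwise l (fun x => x)

-- ===== VERDICT (by name: the statement is the Claim_ definition above) =====
theorem solution_spec : Claim_equal_solution := by
  intro ability number _ hpre
  unfold Spec_solution solution solution_alt
  rcases hpre with hnum | hlen
  · have h0 : number.toNat = 0 := Int.toNat_of_nonpos hnum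
    rw [h0]
    simp only [loopA, loopB]
    rw [heapSum_eq, toMul_heapify, ← sortedB_perm ability]
    rfl
  · have hInv : HInv (heapify ability) (PySem.List.sorted ability (fun x => x) false) := by
      refine ⟨?_, isHeap_heapify ability, sortedB_sorted ability, ?_⟩
      · rw [toMul_heapify, sortedB_perm]
      · rw [PySem.List.length_sorted]; exact hlen
    obtain ⟨hm, _, _, _⟩ := loop_inv number.toNat _ _ hInv
    rw [heapSum_eq, hm]
    rfl
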